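-- pv_equiv track=rewrite | github.com/kanonnon/prokiso | exhard/exhard-percolation-option-62101046.py | percolates
-- ===== SOURCE A (Python) =====
-- def _flow(isOpen, isFull, i, j):
--     """
--     引数：isOpen: list[list[bool]], i: int, j: int
--     返値：None
--     """
--
--     # isOpen行列の、行列の大きさを取得する
--     n = len(isOpen)
--
--     # iとjの境界条件を満たさないならreturn
--     if not (0 <= i < n and 0 <= j < n):
--         return
--
--     # isOpen[i][j]がOpenでないならreturn
--     if isOpen[i][j] == False:
--         return
--
--     # isFull[i][j]がFullならreturn
--     if isFull[i][j] == True: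
--         return
--
--     # isFull[i][j]をTrueに設定
--     isFull[i][j] = True
--
--     # site[i+1][j], site[i][j+1], site[i][j-1], site[i-1][j]に対して_flowを呼び出す
--     _flow(isOpen, isFull, i+1, j)
--     _flow(isOpen, isFull, i, j+1)
--     _flow(isOpen, isFull, i, j-1)
--     _flow(isOpen, isFull, i-1, j)
--
-- def flow(isOpen):
--     """
--     引数：isOpen: list[list[bool]]
--     返値：list[list[bool]]
--     """
--     # isOpen行列の、行列の大きさを取得する
--     n = len(isOpen)
--
--     # isFull行列を初期化する
--     isFull = []
--     for i in range(n):
--         isFull.append([False] * n)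
--
--     # 最上部のsiteすべてについて、_flowを呼び出す
--     for i in range(n):
--         _flow(isOpen, isFull, 0, i)
--
--     # isFullをreturn
--     return isFull
--
-- def percolates(isOpen):
--     """
--     引数：isOpen: list[list[bool]]
--     返値：bool
--     """
--     # バーコレートしているかを表すBool型変数（初期値はFalseでパーコレートしてたらTrueにする）
--     percolates = False
--
--     # isOpen行列の、行列の大きさを取得する
--     n = len(isOpen)
--
--     # isFullを生成する
--     isFull = flow(isOpen)
--
--     # 最下部の列を検査して、パーコレートしているか確かめる
--     for i in range(n):
--         if isFull[n-1][i] == True: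
--             percolates = True
--             break
--
--     return percolates
-- ===== SOURCE B (Python) =====
-- def percolates(isOpen):
--     n = len(isOpen)
--     isFull = [[False] * n for _ in range(n)]
--     # seeds pushed in reverse so the left-most top cell is popped first
--     stack = [(0, j) for j in range(n - 1, -1, -1)]
--     while stack:
--         i, j = stack.pop()
--         if not (0 <= i < len(isFull) and 0 <= j < len(isFull[i])):
--             continue
--         if not isOpen[i][j]:
--             continue
--         if isFull[i][j]:
--             continue
--         isFull[i][j] = True
--         stack.extend([(i - 1, j), (i, j - 1), (i, j + 1), (i + 1, j)])
--     return n > 0 and any(isFull[n - 1])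
-- ===== Notes on version B (the rewrite author's own statement) =====
-- stated objective: alternative
-- what changed: Replaces the recursive _flow flood fill (and its helper-built full-grid) with a single iterative flood fill using an explicit stack of cells, seeding the top row and applying the bounds/open/visited guards at pop time, then checking the bottom row with any().
-- outside the precondition, e.g. on percolates([[False, False], [True]]): A returns False, B returns False
import Mathlib
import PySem

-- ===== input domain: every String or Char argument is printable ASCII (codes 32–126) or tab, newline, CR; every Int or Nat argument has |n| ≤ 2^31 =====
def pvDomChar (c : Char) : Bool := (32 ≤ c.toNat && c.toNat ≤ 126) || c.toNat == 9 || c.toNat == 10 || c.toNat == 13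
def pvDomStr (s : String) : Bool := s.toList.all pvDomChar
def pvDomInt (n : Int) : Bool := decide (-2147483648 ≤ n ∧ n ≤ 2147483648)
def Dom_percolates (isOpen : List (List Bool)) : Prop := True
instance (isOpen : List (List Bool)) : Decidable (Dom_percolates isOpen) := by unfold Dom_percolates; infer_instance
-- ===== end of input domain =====

-- B replaces A's recursive flood fill by an iterative explicit-stack flood fill (alternative
-- decomposition, no call stack); the return value is proved identical.

-- ===== PORT A =====
-- shared primitive: g[i][j] (exact at the in-bounds non-negative indices the guards admit;
-- out of range Python raises IndexError — those inputs are excluded by Pre_)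
def cellGet (g : List (List Bool)) (i j : Int) : Bool :=
  PySem.List.pyGetD (PySem.List.pyGetD g i []) j false

-- shared primitive: g[i][j] = v (in-place row assignment)
def gridSet (g : List (List Bool)) (i j : Int) (v : Bool) : List (List Bool) :=
  PySem.List.pySetD g i (PySem.List.pySetD (PySem.List.pyGetD g i []) j v)

-- A's recursive _flow; the Nat fuel only makes the recursion total (it is never exhausted at
-- the fuel percolates passes, see lemma `sim` below); the four sequential mutating recursive
-- calls become the nested composition on the grid value
def flowAux (isOpen : List (List Bool)) (fuel : Nat) (isFull : List (List Bool))
    (i j : Int) : List (List Bool) :=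
  match fuel with
  | 0 => isFull
  | Nat.succ f =>
    if 0 ≤ i ∧ i < (isOpen.length : Int) ∧ 0 ≤ j ∧ j < (isOpen.length : Int) then
      if cellGet isOpen i j = false then isFull
      else if cellGet isFull i j = true then isFull
      else
        flowAux isOpen f
          (flowAux isOpen f
            (flowAux isOpen f
              (flowAux isOpen f (gridSet isFull i j true) (i+1) j)
              i (j+1))
            i (j-1))
          (i-1) j
    else isFull

-- A's flow
def flow (isOpen : List (List Bool)) : List (List Bool) :=
  let n := isOpen.length
  let init := (PySem.List.pyRange 0 (n : Int) 1).foldl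
    (fun acc _ => acc ++ [List.replicate n false]) []
  (PySem.List.pyRange 0 (n : Int) 1).foldl
    (fun full i => flowAux isOpen (n * n + 1) full 0 i) init

-- A's percolates (the bottom-row loop with break is an `any`)
def percolates (isOpen : List (List Bool)) : Bool :=
  let n := isOpen.length
  let isFull := flow isOpen
  (PySem.List.pyRange 0 (n : Int) 1).any (fun i => cellGet isFull ((n : Int) - 1) i == true)

-- ===== PORT B =====
-- B's while-loop; the Lean list is B's Python stack reversed (Python pops from the END, here
-- the head is the top of the stack), so extend-then-pop pops (i+1, j) first. The Nat fuel
-- only makes the loop total (never exhausted at the fuel percolates_alt passes, see below).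
def loopB (isOpen : List (List Bool)) (fuel : Nat) (isFull : List (List Bool))
    (stack : List (Int × Int)) : List (List Bool) :=
  match stack, fuel with
  | [], _ => isFull
  | _ :: _, 0 => isFull
  | (i, j) :: rest, Nat.succ f =>
    if 0 ≤ i ∧ i < (isFull.length : Int) ∧ 0 ≤ j ∧
        j < ((PySem.List.pyGetD isFull i []).length : Int) then
      if cellGet isOpen i j = false then loopB isOpen f isFull rest
      else if cellGet isFull i j = true then loopB isOpen f isFull rest
      else loopB isOpen f (gridSet isFull i j true)
        ((i+1, j) :: (i, j+1) :: (i, j-1) :: (i-1, j) :: rest)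
    else loopB isOpen f isFull rest

-- B's percolates: seed the top row, flood iteratively, inspect the bottom row
def percolates_alt (isOpen : List (List Bool)) : Bool :=
  let n := isOpen.length
  let isFull := (PySem.List.pyRange 0 (n : Int) 1).map (fun _ => List.replicate n false)
  let final := loopB isOpen (4 * (n * n) + n) isFull
    ((PySem.List.pyRange 0 (n : Int) 1).map (fun j => ((0 : Int), j)))
  decide (0 < n) && (PySem.List.pyGetD final ((n : Int) - 1) []).any id

-- ===== PRECONDITION & SPEC =====
-- Pre_ excludes grids with a row shorter than the number of rows: on those both Pythons raise
-- IndexError whenever the flood reaches a missing cell (and where the flood never reaches one,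
-- A and B still return the same value — see the cite in claim.json).
def Pre_percolates (isOpen : List (List Bool)) : Prop :=
  ∀ row ∈ isOpen, isOpen.length ≤ row.length
instance (isOpen : List (List Bool)) : Decidable (Pre_percolates isOpen) := by
  unfold Pre_percolates; infer_instance
def pvWitness_percolates : List (List Bool) := [[true, false], [true, true]]
def Spec_percolates (isOpen : List (List Bool)) (out : Bool) : Prop := out = percolates_alt isOpen
instance (isOpen : List (List Bool)) (out : Bool) : Decidable (Spec_percolates isOpen out) := by
  unfold Spec_percolates; infer_instance

-- ===== CLAIM (what is proved, stated in full; the proofs are below) =====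
def Claim_equal_percolates : Prop := ∀ (isOpen : List (List Bool)), Dom_percolates isOpen →
  Pre_percolates isOpen → Spec_percolates isOpen (percolates isOpen)

-- ===== LEMMAS AND PROOFS =====

-- number of not-yet-full cells: with it, 4 * unmarked + |stack| bounds the number of loop
-- steps left, which shows neither fuel is ever exhausted
def unmarked (g : List (List Bool)) : Nat := (g.map (fun r => r.count false)).sum

-- an n × n grid of booleans
def ShapeN (n : Nat) (g : List (List Bool)) : Prop :=
  g.length = n ∧ ∀ r ∈ g, r.length = n

theorem count_false_set (r : List Bool) : ∀ k : Nat, k < r.length → r[k]? = some false →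
    (r.set k true).count false + 1 = r.count false := by
  induction r with
  | nil => intro k hk; simp at hk
  | cons b bs ih =>
    intro k hk hb
    cases k with
    | zero => simp_all
    | succ k =>
      simp only [List.set_cons_succ, List.count_cons]
      have := ih k (by simpa using hk) (by simpa using hb)
      omega

theorem unmarked_set (g : List (List Bool)) : ∀ (m : Nat) (r' : List Bool), m < g.length →
    unmarked (g.set m r') + (g[m]?.getD []).count false = unmarked g + r'.count false := by
  induction g with
  | nil => intro m r' hm; simp at hm
  | cons r gs ih =>
    intro m r' hm
    cases m with
    | zero => simp [unmarked]; omega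
    | succ m =>
      simp only [List.set_cons_succ, unmarked, List.map_cons, List.sum_cons,
        List.getElem?_cons_succ]
      have := ih m r' (by simpa using hm)
      simp only [unmarked] at this
      omega

theorem unmarked_gridSet_lt (g : List (List Bool)) (i j : Int)
    (h : 0 ≤ i ∧ i < (g.length : Int) ∧ 0 ≤ j ∧ j < ((PySem.List.pyGetD g i []).length : Int))
    (hf : ¬ cellGet g i j = true) :
    unmarked (gridSet g i j true) < unmarked g := by
  obtain ⟨h0, h1, h2, h3⟩ := h
  have hrow : PySem.List.pyGetD g i [] = g[i.toNat]'(by omega) :=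
    PySem.List.pyGetD_eq_getElem _ _ h0 h1
  have hm : i.toNat < g.length := by omega
  have hk : j.toNat < (g[i.toNat]'hm).length := by rw [hrow] at h3; omega
  have hcell : cellGet g i j = (g[i.toNat]'hm)[j.toNat]'hk := by
    unfold cellGet
    rw [hrow, PySem.List.pyGetD_eq_getElem _ _ h2 (by rw [hrow] at h3; exact h3)]
  have hfalse : (g[i.toNat]'hm)[j.toNat]'hk = false := by
    rw [hcell] at hf; exact Bool.eq_false_iff.mpr hf
  have hset : gridSet g i j true = g.set i.toNat ((g[i.toNat]'hm).set j.toNat true) := by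
    unfold gridSet
    rw [hrow, PySem.List.pySetD_of_nonneg _ _ h2, PySem.List.pySetD_of_nonneg _ _ h0]
  have hc := count_false_set (g[i.toNat]'hm) j.toNat hk
    (by simp [List.getElem?_eq_getElem hk, hfalse])
  have hu := unmarked_set g i.toNat ((g[i.toNat]'hm).set j.toNat true) hm
  rw [hset]
  rw [List.getElem?_eq_getElem hm] at hu
  simp only [Option.getD_some] at hu
  omega

theorem cellGet_eq (g : List (List Bool)) (i j : Int) (h0 : 0 ≤ i) (h1 : i.toNat < g.length)
    (h2 : 0 ≤ j) (h3 : j.toNat < (g[i.toNat]'h1).length) :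
    cellGet g i j = (g[i.toNat]'h1)[j.toNat]'h3 := by
  unfold cellGet
  rw [PySem.List.pyGetD_eq_getElem _ _ h0 (by omega),
      PySem.List.pyGetD_eq_getElem _ _ h2 (by omega)]

theorem gridSet_eq (g : List (List Bool)) (i j : Int) (v : Bool) (h0 : 0 ≤ i)
    (h1 : i.toNat < g.length) (h2 : 0 ≤ j) :
    gridSet g i j v = g.set i.toNat ((g[i.toNat]'h1).set j.toNat v) := by
  unfold gridSet
  rw [PySem.List.pyGetD_eq_getElem _ _ h0 (by omega), PySem.List.pySetD_of_nonneg _ _ h2,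
      PySem.List.pySetD_of_nonneg _ _ h0]

theorem shape_gridSet {n : Nat} {g : List (List Bool)} (i j : Int) (v : Bool)
    (hs : ShapeN n g) (h0 : 0 ≤ i) (h1 : i.toNat < g.length) (h2 : 0 ≤ j) :
    ShapeN n (gridSet g i j v) := by
  rw [gridSet_eq g i j v h0 h1 h2]
  refine ⟨by simpa using hs.1, ?_⟩
  intro r hr
  rcases List.mem_or_eq_of_mem_set hr with hmem | rfl
  · exact hs.2 r hmem
  · simpa using hs.2 _ (g.getElem_mem h1)

-- under ShapeN, B's pop-time guard is A's bounds guard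
theorem guard_iff {n : Nat} {g : List (List Bool)} (hs : ShapeN n g) (i j : Int) :
    (0 ≤ i ∧ i < (g.length : Int) ∧ 0 ≤ j ∧ j < ((PySem.List.pyGetD g i []).length : Int))
    ↔ (0 ≤ i ∧ i < (n : Int) ∧ 0 ≤ j ∧ j < (n : Int)) := by
  obtain ⟨hl, hrows⟩ := hs
  constructor
  · rintro ⟨h0, h1, h2, h3⟩
    have hrow : PySem.List.pyGetD g i [] = g[i.toNat]'(by omega) :=
      PySem.List.pyGetD_eq_getElem _ _ h0 h1
    have := hrows _ (g.getElem_mem (show i.toNat < g.length by omega))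
    rw [hrow, this] at h3
    omega
  · rintro ⟨h0, h1, h2, h3⟩
    have hm : i.toNat < g.length := by omega
    have hrow : PySem.List.pyGetD g i [] = g[i.toNat]'hm :=
      PySem.List.pyGetD_eq_getElem _ _ h0 (by omega)
    have := hrows _ (g.getElem_mem hm)
    rw [hrow, this]
    omega

theorem flowAux_mono (isOpen : List (List Bool)) :
    ∀ (f : Nat) (g : List (List Bool)) (i j : Int), ShapeN isOpen.length g →
      ShapeN isOpen.length (flowAux isOpen f g i j) ∧
        unmarked (flowAux isOpen f g i j) ≤ unmarked g := by
  intro f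
  induction f with
  | zero => intro g i j hs; exact ⟨hs, le_refl _⟩
  | succ f ih =>
    intro g i j hs
    rw [flowAux]
    by_cases hg : 0 ≤ i ∧ i < (isOpen.length : Int) ∧ 0 ≤ j ∧ j < (isOpen.length : Int)
    · simp only [if_pos hg]
      by_cases ho : cellGet isOpen i j = false
      · simp only [if_pos ho]; exact ⟨hs, le_refl _⟩
      · simp only [if_neg ho]
        by_cases hfl : cellGet g i j = true
        · simp only [if_pos hfl]; exact ⟨hs, le_refl _⟩
        · simp only [if_neg hfl]
          have h0 : 0 ≤ i := hg.1
          have h1 : i.toNat < g.length := by have := hg.2.1; have := hs.1; omega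
          have h2 : 0 ≤ j := hg.2.2.1
          have hs1 := shape_gridSet i j true hs h0 h1 h2
          have hu1 : unmarked (gridSet g i j true) < unmarked g :=
            unmarked_gridSet_lt g i j ((guard_iff hs i j).mpr hg) hfl
          obtain ⟨hs2, hu2⟩ := ih (gridSet g i j true) (i+1) j hs1
          obtain ⟨hs3, hu3⟩ := ih _ i (j+1) hs2
          obtain ⟨hs4, hu4⟩ := ih _ i (j-1) hs3
          obtain ⟨hs5, hu5⟩ := ih _ (i-1) j hs4
          exact ⟨hs5, by omega⟩
    · simp only [if_neg hg]; exact ⟨hs, le_refl _⟩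

-- above the measure 4 * unmarked + |stack|, loopB's fuel is irrelevant
theorem loopB_stable (isOpen : List (List Bool)) :
    ∀ (f : Nat) (g : List (List Bool)) (stack : List (Int × Int)),
      4 * unmarked g + stack.length ≤ f →
      loopB isOpen f g stack = loopB isOpen (f + 1) g stack := by
  intro f
  induction f using Nat.strong_induction_on with
  | _ f ih =>
    intro g stack hf
    match stack with
    | [] => cases f <;> rfl
    | (i, j) :: rest =>
      obtain ⟨f', rfl⟩ : ∃ f', f = f' + 1 := ⟨f - 1, by simp at hf; omega⟩
      rw [loopB, loopB]
      by_cases hg : 0 ≤ i ∧ i < (g.length : Int) ∧ 0 ≤ j ∧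
          j < ((PySem.List.pyGetD g i []).length : Int)
      · simp only [if_pos hg]
        by_cases ho : cellGet isOpen i j = false
        · simp only [if_pos ho]
          exact ih f' (by omega) g rest (by simp at hf ⊢; omega)
        · simp only [if_neg ho]
          by_cases hfl : cellGet g i j = true
          · simp only [if_pos hfl]
            exact ih f' (by omega) g rest (by simp at hf ⊢; omega)
          · simp only [if_neg hfl]
            have := unmarked_gridSet_lt g i j hg hfl
            exact ih f' (by omega) _ _ (by simp at hf ⊢; omega)
      · simp only [if_neg hg]
        exact ih f' (by omega) g rest (by simp at hf ⊢; omega)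

theorem loopB_ge (isOpen : List (List Bool)) (g : List (List Bool)) (stack : List (Int × Int))
    (f : Nat) (h : 4 * unmarked g + stack.length ≤ f) :
    ∀ k : Nat, loopB isOpen (f + k) g stack = loopB isOpen f g stack := by
  intro k
  induction k with
  | zero => rfl
  | succ k ihk =>
    have := loopB_stable isOpen (f + k) g stack (by omega)
    rw [show f + (k + 1) = (f + k) + 1 by omega, ← this, ihk]

theorem loopB_irrel (isOpen : List (List Bool)) (g : List (List Bool))
    (stack : List (Int × Int)) (f1 f2 : Nat) (h1 : 4 * unmarked g + stack.length ≤ f1)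
    (h2 : 4 * unmarked g + stack.length ≤ f2) :
    loopB isOpen f1 g stack = loopB isOpen f2 g stack := by
  rcases Nat.le_total f1 f2 with h | h
  · rw [show f2 = f1 + (f2 - f1) by omega, loopB_ge isOpen g stack f1 h1]
  · rw [show f1 = f2 + (f1 - f2) by omega, loopB_ge isOpen g stack f2 h2]

-- the central simulation: popping (i, j) and flooding it with the explicit stack is exactly
-- running A's recursive _flow at (i, j) first
theorem sim (isOpen : List (List Bool)) :
    ∀ (F : Nat) (g : List (List Bool)) (i j : Int) (rest : List (Int × Int)) (f1 f2 : Nat),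
      ShapeN isOpen.length g → unmarked g < F →
      4 * unmarked g + rest.length + 1 ≤ f1 →
      4 * unmarked (flowAux isOpen F g i j) + rest.length ≤ f2 →
      loopB isOpen f1 g ((i, j) :: rest) = loopB isOpen f2 (flowAux isOpen F g i j) rest := by
  intro F
  induction F with
  | zero => intro g i j rest f1 f2 hs hu; omega
  | succ F ih =>
    intro g i j rest f1 f2 hs hu hf1 hf2
    obtain ⟨f1', rfl⟩ : ∃ f', f1 = f' + 1 := ⟨f1 - 1, by omega⟩
    rw [loopB, flowAux]
    rw [flowAux] at hf2
    by_cases hg : 0 ≤ i ∧ i < (isOpen.length : Int) ∧ 0 ≤ j ∧ j < (isOpen.length : Int)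
    · rw [if_pos ((guard_iff hs i j).mpr hg), if_pos hg]
      rw [if_pos hg] at hf2
      by_cases ho : cellGet isOpen i j = false
      · simp only [if_pos ho] at hf2 ⊢
        exact loopB_irrel isOpen g rest f1' f2 (by omega) (by omega)
      · simp only [if_neg ho] at hf2 ⊢
        by_cases hfl : cellGet g i j = true
        · simp only [if_pos hfl] at hf2 ⊢
          exact loopB_irrel isOpen g rest f1' f2 (by omega) (by omega)
        · simp only [if_neg hfl] at hf2 ⊢
          have h0 : 0 ≤ i := hg.1
          have h1 : i.toNat < g.length := by have := hg.2.1; have := hs.1; omega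
          have h2 : 0 ≤ j := hg.2.2.1
          have hs1 := shape_gridSet i j true hs h0 h1 h2
          have hu1 : unmarked (gridSet g i j true) < unmarked g :=
            unmarked_gridSet_lt g i j ((guard_iff hs i j).mpr hg) hfl
          obtain ⟨hs2, hu2⟩ := flowAux_mono isOpen F (gridSet g i j true) (i+1) j hs1
          obtain ⟨hs3, hu3⟩ := flowAux_mono isOpen F _ i (j+1) hs2
          obtain ⟨hs4, hu4⟩ := flowAux_mono isOpen F _ i (j-1) hs3
          rw [ih (gridSet g i j true) (i+1) j _ f1' f1' hs1 (by omega) (by simp; omega)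
            (by simp; omega)]
          rw [ih _ i (j+1) _ f1' f1' hs2 (by omega) (by simp; omega) (by simp; omega)]
          rw [ih _ i (j-1) _ f1' f1' hs3 (by omega) (by simp; omega) (by simp; omega)]
          rw [ih _ (i-1) j rest f1' f2 hs4 (by omega) (by simp; omega) (by omega)]
    · rw [if_neg (by rw [guard_iff hs i j]; exact hg), if_neg hg]
      rw [if_neg hg] at hf2
      exact loopB_irrel isOpen g rest f1' f2 (by omega) (by omega)

theorem unmarked_le_of_shape {n : Nat} {g : List (List Bool)} (hs : ShapeN n g) :
    unmarked g ≤ n * n := by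
  obtain ⟨hl, hrows⟩ := hs
  unfold unmarked
  calc (g.map (fun r => r.count false)).sum
      ≤ (g.map (fun r => r.count false)).length * n := by
        apply List.sum_le_card_nsmul
        intro x hx
        obtain ⟨r, hr, rfl⟩ := List.mem_map.mp hx
        calc r.count false ≤ r.length := List.count_le_length
          _ = n := hrows r hr
    _ = n * n := by rw [List.length_map, hl]

theorem seed_chain (isOpen : List (List Bool)) :
    ∀ (js : List Int) (g : List (List Bool)) (f : Nat), ShapeN isOpen.length g →
      4 * unmarked g + js.length ≤ f →
      loopB isOpen f g (js.map (fun j => ((0 : Int), j))) =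
        js.foldl (fun h j => flowAux isOpen (isOpen.length * isOpen.length + 1) h 0 j) g := by
  intro js
  induction js with
  | nil => intro g f hs hf; cases f <;> rfl
  | cons j js ihj =>
    intro g f hs hf
    simp only [List.map_cons, List.foldl_cons]
    have hle := unmarked_le_of_shape hs
    obtain ⟨hs', hu'⟩ := flowAux_mono isOpen (isOpen.length * isOpen.length + 1) g 0 j hs
    rw [sim isOpen (isOpen.length * isOpen.length + 1) g 0 j _ f f hs (by omega)
      (by simp at hf ⊢; omega) (by simp at hf ⊢; omega)]
    exact ihj _ f hs' (by simp at hf ⊢; omega)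

theorem shape_init (n : Nat) :
    ShapeN n ((PySem.List.pyRange 0 (n : Int) 1).map (fun _ => List.replicate n false)) := by
  constructor
  · rw [List.length_map, PySem.List.length_pyRange_one]; omega
  · intro r hr
    obtain ⟨x, hx, rfl⟩ := List.mem_map.mp hr
    simp

theorem flow_eq (isOpen : List (List Bool)) :
    flow isOpen = (PySem.List.pyRange 0 ((isOpen.length : Int)) 1).foldl
      (fun full i => flowAux isOpen (isOpen.length * isOpen.length + 1) full 0 i)
      ((PySem.List.pyRange 0 ((isOpen.length : Int)) 1).map
        (fun _ => List.replicate isOpen.length false)) := by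
  have h1 : flow isOpen = (PySem.List.pyRange 0 ((isOpen.length : Int)) 1).foldl
      (fun full i => flowAux isOpen (isOpen.length * isOpen.length + 1) full 0 i)
      ((PySem.List.pyRange 0 ((isOpen.length : Int)) 1).foldl
        (fun acc _ => acc ++ [List.replicate isOpen.length false]) []) := rfl
  rw [h1, PySem.List.foldl_append_singleton_eq_map (fun _ => List.replicate isOpen.length false),
    List.nil_append]

theorem shape_flow (isOpen : List (List Bool)) : ShapeN isOpen.length (flow isOpen) := by
  rw [flow_eq]
  generalize hinit : (PySem.List.pyRange 0 ((isOpen.length : Int)) 1).map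
    (fun _ => List.replicate isOpen.length false) = init
  have hs : ShapeN isOpen.length init := hinit ▸ shape_init isOpen.length
  generalize PySem.List.pyRange 0 ((isOpen.length : Int)) 1 = js
  clear hinit
  induction js generalizing init with
  | nil => exact hs
  | cons j js ihj =>
    simp only [List.foldl_cons]
    exact ihj _ (flowAux_mono isOpen _ init 0 j hs).1

-- the two final grids are identical
theorem final_grid_eq (isOpen : List (List Bool)) :
    loopB isOpen (4 * (isOpen.length * isOpen.length) + isOpen.length)
      ((PySem.List.pyRange 0 ((isOpen.length : Int)) 1).map
        (fun _ => List.replicate isOpen.length false))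
      ((PySem.List.pyRange 0 ((isOpen.length : Int)) 1).map (fun j => ((0 : Int), j))) =
      flow isOpen := by
  have hs := shape_init isOpen.length
  have hle := unmarked_le_of_shape hs
  rw [seed_chain isOpen _ _ _ hs
    (by simp only [PySem.List.length_pyRange_one]; omega), flow_eq]

theorem main_eq (isOpen : List (List Bool)) : percolates isOpen = percolates_alt isOpen := by
  unfold percolates percolates_alt
  simp only []
  rw [final_grid_eq isOpen]
  generalize hF : flow isOpen = F
  have hs : ShapeN isOpen.length F := hF ▸ shape_flow isOpen
  generalize hn : isOpen.length = n
  rw [hn] at hs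
  clear hF hn
  rcases Nat.eq_zero_or_pos n with rfl | hn
  · rw [PySem.List.pyRange_one_eq_nil (by omega)]
    simp
  · have hFl : F.length = n := hs.1
    have hm : n - 1 < F.length := by omega
    have hidx : ((n : Int) - 1) = ((n - 1 : Nat) : Int) := by omega
    rw [hidx]
    have hrow : PySem.List.pyGetD F (((n - 1 : Nat) : Int)) [] = F[n-1]'hm := by
      rw [PySem.List.pyGetD_eq_getElem _ _ (by omega) (by omega)]
      simp
    have hrlen : (F[n-1]'hm).length = n := hs.2 _ (F.getElem_mem hm)
    rw [hrow, Bool.eq_iff_iff]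
    simp only [List.any_eq_true, decide_eq_true_eq, Bool.and_eq_true, id_eq, beq_iff_eq]
    constructor
    · rintro ⟨i, hi, hcell⟩
      rw [PySem.List.mem_pyRange_one] at hi
      rw [cellGet_eq F _ i (by omega) (by simp only [Int.toNat_natCast]; omega) (by omega)
            (by simp only [Int.toNat_natCast, hrlen]; omega)] at hcell
      simp only [Int.toNat_natCast] at hcell
      have hib : i.toNat < (F[n-1]'hm).length := by rw [hrlen]; omega
      exact ⟨by omega, _, List.getElem_mem hib, hcell⟩
    · rintro ⟨-, x, hx, hid⟩
      obtain ⟨k, hk, rfl⟩ := List.getElem_of_mem hx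
      refine ⟨(k : Int), ?_, ?_⟩
      · rw [PySem.List.mem_pyRange_one]
        rw [hrlen] at hk
        omega
      · rw [cellGet_eq F _ (k : Int) (by omega) (by simp only [Int.toNat_natCast]; omega)
            (by omega) (by simp only [Int.toNat_natCast, hrlen]; rw [hrlen] at hk; omega)]
        simp only [Int.toNat_natCast]
        exact hid

-- ===== VERDICT (by name: the statement is the Claim_ definition above) =====
theorem percolates_spec : Claim_equal_percolates := by
  intro isOpen _ _
  show percolates isOpen = percolates_alt isOpen
  exact main_eq isOpen
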